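-- pv_equiv track=rewrite | github.com/NayantharaPrathap/Kattis_Solutions | IntegerLists_Method2.py | intlists
-- ===== SOURCE A (Python) =====
-- from collections import deque
--
-- def intlists(p, n, l):
--     if sum(1 for c in p if c == 'D') > n:
--         return 'error'
--
--     d = deque(l)
--     is_rev = False
--
--     for c in p:
--         if c == 'R':
--             is_rev = not is_rev
--         elif is_rev:
--             d.pop()
--         else:
--             d.popleft()
--
--     a = []
--     if is_rev:
--         while d:
--             a.append(d.pop())
--     else:
--         while d:
--             a.append(d.popleft())
--     return '[' + ','.join(a) + ']'
-- ===== SOURCE B (Python) =====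
-- def intlists(p, n, l):
--     if sum(1 for c in p if c == 'D') > n:
--         return 'error'
--     front = 0
--     back = 0
--     rev = False
--     for c in p:
--         if c == 'R':
--             rev = not rev
--         elif rev:
--             back += 1
--         else:
--             front += 1
--     if front + back > len(l):
--         raise IndexError('pop from an empty deque')
--     mid = l[front:len(l) - back]
--     if rev:
--         mid.reverse()
--     return '[' + ','.join(mid) + ']'
-- ===== Notes on version B (the rewrite author's own statement) =====
-- stated objective: simpler
-- what changed: Replaces the deque simulation (per-character pops and a draining while-loop) by one counting pass over p that records reversal parity and front/back drop counts, then takes a single slice of l and reverses it if the final parity is odd; like A it raises IndexError when there are more drops than elements.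
import Mathlib
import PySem

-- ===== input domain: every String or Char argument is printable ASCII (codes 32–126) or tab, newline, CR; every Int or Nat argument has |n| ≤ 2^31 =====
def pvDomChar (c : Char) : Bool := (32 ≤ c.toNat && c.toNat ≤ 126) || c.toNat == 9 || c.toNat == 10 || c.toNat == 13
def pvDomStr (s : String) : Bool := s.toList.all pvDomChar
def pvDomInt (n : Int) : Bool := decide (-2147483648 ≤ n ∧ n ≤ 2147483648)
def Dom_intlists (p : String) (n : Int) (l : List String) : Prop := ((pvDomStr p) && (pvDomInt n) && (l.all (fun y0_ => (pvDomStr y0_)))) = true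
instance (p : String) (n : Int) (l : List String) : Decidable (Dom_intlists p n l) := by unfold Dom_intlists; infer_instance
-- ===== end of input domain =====

-- B replaces A's deque simulation by a counting pass plus one slice (objective: simpler).

-- ===== PORT A =====
-- the 'for c in p' loop over the deque (popleft = tail, pop = dropLast)
def intlistsPopLoop (cs : List Char) (d : List String) (r : Bool) : List String × Bool :=
  match cs with
  | [] => (d, r)
  | c :: cs =>
    if c = 'R' then intlistsPopLoop cs d (!r)
    else if r then intlistsPopLoop cs d.dropLast r
    else intlistsPopLoop cs d.tail r

-- 'while d: a.append(d.popleft())'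
def intlistsDrainFront (d : List String) : List String :=
  match d with
  | [] => []
  | x :: xs => x :: intlistsDrainFront xs

-- 'while d: a.append(d.pop())'
def intlistsDrainBack (d : List String) : List String :=
  match d with
  | [] => []
  | x :: xs => (x :: xs).getLast (by simp) :: intlistsDrainBack (x :: xs).dropLast
termination_by d.length
decreasing_by simp

def intlists (p : String) (n : Int) (l : List String) : String :=
  if (p.toList.foldl (fun acc c => if c = 'D' then acc + 1 else acc) (0 : Int)) > n then "error"
  else
    let s := intlistsPopLoop p.toList l false
    let a := if s.2 then intlistsDrainBack s.1 else intlistsDrainFront s.1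
    "[" ++ PySem.Str.join "," a ++ "]"

-- ===== PORT B =====
-- single counting pass: front drops, back drops, reversal parity
def intlistsCount (cs : List Char) (f b : Int) (r : Bool) : Int × Int × Bool :=
  match cs with
  | [] => (f, b, r)
  | c :: cs =>
    if c = 'R' then intlistsCount cs f b (!r)
    else if r then intlistsCount cs f (b + 1) r
    else intlistsCount cs (f + 1) b r

def intlists_alt (p : String) (n : Int) (l : List String) : String :=
  if (p.toList.foldl (fun acc c => if c = 'D' then acc + 1 else acc) (0 : Int)) > n then "error"
  else
    let t := intlistsCount p.toList 0 0 false
    -- Python raises IndexError here; the branch lies outside Pre_intlists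
    if t.1 + t.2.1 > (l.length : Int) then ""
    else
      let mid := PySem.List.slice l (some t.1) (some ((l.length : Int) - t.2.1))
      let mid := if t.2.2 then mid.reverse else mid
      "[" ++ PySem.Str.join "," mid ++ "]"

-- ===== PRECONDITION & SPEC =====
-- Pre_ excludes exactly the inputs on which both A and B raise IndexError: the 'D'-count is
-- ≤ n (so the error pre-check does not fire) yet p has more non-'R' characters (pops) than l
-- has elements.
def Pre_intlists (p : String) (n : Int) (l : List String) : Prop :=
  ((p.toList.count 'D' : Int) > n) ∨ (p.toList.countP (fun c => !(c == 'R')) ≤ l.length)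
instance (p : String) (n : Int) (l : List String) : Decidable (Pre_intlists p n l) := by unfold Pre_intlists; infer_instance

def pvWitness_intlists : String × Int × List String := ("RDD", 2, ["1", "2", "3"])

def Spec_intlists (p : String) (n : Int) (l : List String) (out : String) : Prop := out = intlists_alt p n l
instance (p : String) (n : Int) (l : List String) (out : String) : Decidable (Spec_intlists p n l out) := by unfold Spec_intlists; infer_instance

-- ===== CLAIM (what is proved, stated in full; the proofs are below) =====
def Claim_equal_intlists : Prop := ∀ (p : String) (n : Int) (l : List String), Dom_intlists p n l → Pre_intlists p n l → Spec_intlists p n l (intlists p n l)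

-- ===== LEMMAS AND PROOFS =====

-- Nat-valued version of the counting pass, used to state the loop invariant
def intlistsCnts (cs : List Char) (r : Bool) : Nat × Nat × Bool :=
  match cs with
  | [] => (0, 0, r)
  | c :: cs =>
    if c = 'R' then intlistsCnts cs (!r)
    else
      let t := intlistsCnts cs r
      if r then (t.1, t.2.1 + 1, t.2.2) else (t.1 + 1, t.2.1, t.2.2)

lemma intlistsCount_eq (cs : List Char) (f b : Int) (r : Bool) :
    intlistsCount cs f b r =
      (f + ((intlistsCnts cs r).1 : Int), b + ((intlistsCnts cs r).2.1 : Int), (intlistsCnts cs r).2.2) := by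
  induction cs generalizing f b r with
  | nil => simp [intlistsCount, intlistsCnts]
  | cons c cs ih =>
    by_cases hc : c = 'R'
    · simp [intlistsCount, intlistsCnts, hc, ih]
    · cases r <;> simp [intlistsCount, intlistsCnts, hc, ih] <;> ring

lemma intlistsCnts_total (cs : List Char) (r : Bool) :
    (intlistsCnts cs r).1 + (intlistsCnts cs r).2.1 = cs.countP (fun c => !(c == 'R')) := by
  induction cs generalizing r with
  | nil => simp [intlistsCnts]
  | cons c cs ih =>
    by_cases hc : c = 'R'
    · simp [intlistsCnts, hc, ih]
    · have h1 := ih r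
      cases r <;> simp [intlistsCnts, hc] at h1 ⊢ <;> omega

lemma intlistsPopLoop_eq (cs : List Char) (d : List String) (r : Bool)
    (h : (intlistsCnts cs r).1 + (intlistsCnts cs r).2.1 ≤ d.length) :
    intlistsPopLoop cs d r =
      ((d.drop (intlistsCnts cs r).1).take (d.length - (intlistsCnts cs r).1 - (intlistsCnts cs r).2.1),
       (intlistsCnts cs r).2.2) := by
  induction cs generalizing d r with
  | nil => simp [intlistsPopLoop, intlistsCnts, List.take_length]
  | cons c cs ih =>
    by_cases hc : c = 'R'
    · simpa [intlistsPopLoop, intlistsCnts, hc] using ih d (!r) (by simpa [intlistsCnts, hc] using h)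
    · cases r with
      | true =>
        have h' : (intlistsCnts cs true).1 + (intlistsCnts cs true).2.1 ≤ d.dropLast.length := by
          simp [intlistsCnts, hc] at h; simp [List.length_dropLast]; omega
        have := ih d.dropLast true h'
        simp [intlistsPopLoop, intlistsCnts, hc, this]
        rw [List.dropLast_eq_take, List.drop_take, List.take_take]
        congr 1
        omega
      | false =>
        have h' : (intlistsCnts cs false).1 + (intlistsCnts cs false).2.1 ≤ d.tail.length := by
          simp [intlistsCnts, hc] at h; simp [List.length_tail]; omega
        have := ih d.tail false h'
        simp [intlistsPopLoop, intlistsCnts, hc, this]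
        omega

lemma intlistsDrainFront_eq (d : List String) : intlistsDrainFront d = d := by
  induction d with
  | nil => rfl
  | cons x xs ih => simp [intlistsDrainFront, ih]

lemma intlistsDrainBack_eq (d : List String) : intlistsDrainBack d = d.reverse := by
  induction d using intlistsDrainBack.induct with
  | case1 => simp [intlistsDrainBack]
  | case2 x xs ih =>
    rw [intlistsDrainBack, ih]
    rw [show (x :: xs).getLast (by simp) :: (x :: xs).dropLast.reverse
          = ((x :: xs).dropLast ++ [(x :: xs).getLast (by simp)]).reverse by simp]
    rw [List.dropLast_concat_getLast (by simp)]

-- ===== VERDICT (by name: the statement is the Claim_ definition above) =====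
theorem intlists_spec : Claim_equal_intlists := by
  intro p n l _ hpre
  unfold Spec_intlists intlists intlists_alt
  by_cases herr : (p.toList.foldl (fun acc c => if c = 'D' then acc + 1 else acc) (0 : Int)) > n
  · simp [herr]
  · simp only [herr, if_false]
    have hcnt : (p.toList.foldl (fun acc c => if c = 'D' then acc + 1 else acc) (0 : Int))
        = (p.toList.count 'D' : Int) := by
      simpa using PySem.List.foldl_ite_add_one (p := fun c => c = 'D') (l := p.toList) (a := (0 : Int))
    have hle : p.toList.countP (fun c => !(c == 'R')) ≤ l.length := by
      rcases hpre with h | h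
      · exact absurd (hcnt ▸ h) herr
      · exact h
    have htot := intlistsCnts_total p.toList false
    have hbound : (intlistsCnts p.toList false).1 + (intlistsCnts p.toList false).2.1 ≤ l.length := by
      omega
    rw [intlistsPopLoop_eq p.toList l false hbound, intlistsCount_eq]
    have hguard : ¬ (((0 : Int) + ((intlistsCnts p.toList false).1 : Int))
        + ((0 : Int) + ((intlistsCnts p.toList false).2.1 : Int)) > (l.length : Int)) := by
      push_cast; omega
    rw [if_neg hguard]
    have hb : (intlistsCnts p.toList false).2.1 ≤ l.length := by omega
    have hslice : PySem.List.slice l (some ((0 : Int) + ((intlistsCnts p.toList false).1 : Int)))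
        (some ((l.length : Int) - ((0 : Int) + ((intlistsCnts p.toList false).2.1 : Int))))
        = (l.drop (intlistsCnts p.toList false).1).take
            (l.length - (intlistsCnts p.toList false).1 - (intlistsCnts p.toList false).2.1) := by
      rw [show ((0 : Int) + ((intlistsCnts p.toList false).1 : Int)) = ((intlistsCnts p.toList false).1 : Int) by ring]
      rw [show ((l.length : Int) - ((0 : Int) + ((intlistsCnts p.toList false).2.1 : Int)))
            = ((l.length - (intlistsCnts p.toList false).2.1 : Nat) : Int) by push_cast [hb]; ring]
      rw [PySem.List.slice_natCast]
      congr 1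
      omega
    simp only [hslice]
    cases hr : (intlistsCnts p.toList false).2.2 <;>
      simp [intlistsDrainFront_eq, intlistsDrainBack_eq]
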